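-- pv_equiv track=rewrite | github.com/infosenselab/ikat_2024 | src/utils.py | get_true_ptkbs
-- ===== SOURCE A (Python) =====
-- def get_true_ptkbs(ptkb_qrels, conversation_id):
--
--     true_ids = []
--     id_found = False
--
--     # iterate
--     for line in ptkb_qrels:
--
--         # split
--         parts = line.strip().split()
--
--         # extract elements
--         id = parts[0]
--         item_id = parts[2]
--         boolean = parts[3]
--
--         # check if the conversation ID matches
--         if id == conversation_id:
--             id_found = True
--
--             # check if the boolean value is '1'
--             if boolean == '1':
--                 true_ids.append(item_id)
--
--     if not id_found:
--         true_ids.append('no ptkb qrels for turn')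
--
--     return true_ids
-- ===== SOURCE B (Python) =====
-- def get_true_ptkbs(ptkb_qrels, conversation_id):
--     # Build a keyed index: conversation id -> list of item_ids with boolean '1'.
--     # A key is created for every id seen, so presence in the dict records id_found.
--     groups = {}
--     for line in ptkb_qrels:
--         id, _, item_id, boolean = line.strip().split()[:4]
--         if id not in groups:
--             groups[id] = []
--         if boolean == '1':
--             groups[id] = groups[id] + [item_id]
--     return groups.get(conversation_id, ['no ptkb qrels for turn'])
-- ===== Notes on version B (the rewrite author's own statement) =====
-- stated objective: idiomatic
-- what changed: B builds a dict mapping every conversation id seen to its '1'-marked item_ids in one pass and answers by a single lookup with a default, replacing A's inline list-plus-id_found-flag accumulation.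
import Mathlib
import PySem

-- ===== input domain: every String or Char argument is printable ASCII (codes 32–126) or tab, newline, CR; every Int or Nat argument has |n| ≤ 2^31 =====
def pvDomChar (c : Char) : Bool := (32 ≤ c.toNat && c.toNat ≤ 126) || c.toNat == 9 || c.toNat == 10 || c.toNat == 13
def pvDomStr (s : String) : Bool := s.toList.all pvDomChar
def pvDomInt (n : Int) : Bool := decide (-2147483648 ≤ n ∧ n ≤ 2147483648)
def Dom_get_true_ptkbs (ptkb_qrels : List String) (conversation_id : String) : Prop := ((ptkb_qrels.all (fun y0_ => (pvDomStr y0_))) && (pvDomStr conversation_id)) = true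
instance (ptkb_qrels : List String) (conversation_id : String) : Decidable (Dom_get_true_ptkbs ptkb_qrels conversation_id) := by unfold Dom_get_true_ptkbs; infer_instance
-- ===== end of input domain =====

-- B replaces A's list-plus-id_found-flag accumulation by a dict keyed on conversation id, answered by one lookup with a default (idiomatic; same cost).

-- ===== PORT A =====
-- A's loop body: parts[0]/parts[2]/parts[3] via pyGet? (none = IndexError, excluded by Pre_)
def stepA (conversation_id : String) (st : List String × Bool) (line : String) : List String × Bool :=
  let parts := PySem.Str.split₀ (PySem.Str.strip line)
  match PySem.List.pyGet? parts 0, PySem.List.pyGet? parts 2, PySem.List.pyGet? parts 3 with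
  | some id, some item_id, some boolean =>
      if id == conversation_id then
        ((if boolean == "1" then st.1 ++ [item_id] else st.1), true)
      else st
  | _, _, _ => st    -- IndexError in Python; Pre_ excludes these inputs

def get_true_ptkbs (ptkb_qrels : List String) (conversation_id : String) : List String :=
  let st := ptkb_qrels.foldl (stepA conversation_id) ([], false)
  if !st.2 then st.1 ++ ["no ptkb qrels for turn"] else st.1

-- ===== PORT B =====
-- B's loop body: `id, _, item_id, boolean = line.strip().split()[:4]` then dict update
def stepB (g : PySem.Dict String (List String)) (line : String) : PySem.Dict String (List String) :=
  match PySem.List.slice (PySem.Str.split₀ (PySem.Str.strip line)) (some 0) (some 4) with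
  | [id, _x, item_id, boolean] =>
      let g := if PySem.Dict.contains g id then g else PySem.Dict.insert g id []
      if boolean == "1" then PySem.Dict.insert g id (PySem.Dict.getD g id [] ++ [item_id]) else g
  | _ => g    -- ValueError (unpacking < 4 fields) in Python; Pre_ excludes these inputs

def get_true_ptkbs_alt (ptkb_qrels : List String) (conversation_id : String) : List String :=
  let groups := ptkb_qrels.foldl stepB PySem.Dict.empty
  match PySem.Dict.get? groups conversation_id with
  | some l => l
  | none => ["no ptkb qrels for turn"]

-- ===== PRECONDITION & SPEC =====
-- Pre_ excludes exactly the inputs where some qrel line has fewer than 4 whitespace-separated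
-- fields, on which A raises IndexError (at parts[3]).
def Pre_get_true_ptkbs (ptkb_qrels : List String) (conversation_id : String) : Prop :=
  ∀ line ∈ ptkb_qrels, 4 ≤ (PySem.Str.split₀ (PySem.Str.strip line)).length
instance (ptkb_qrels : List String) (conversation_id : String) : Decidable (Pre_get_true_ptkbs ptkb_qrels conversation_id) := by unfold Pre_get_true_ptkbs; infer_instance
def pvWitness_get_true_ptkbs : List String × String := (["10_1 0 2 1", "10_1 0 3 0"], "10_1")

def Spec_get_true_ptkbs (ptkb_qrels : List String) (conversation_id : String) (out : List String) : Prop := out = get_true_ptkbs_alt ptkb_qrels conversation_id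
instance (ptkb_qrels : List String) (conversation_id : String) (out : List String) : Decidable (Spec_get_true_ptkbs ptkb_qrels conversation_id out) := by unfold Spec_get_true_ptkbs; infer_instance

-- ===== CLAIM (what is proved, stated in full; the proofs are below) =====
def Claim_equal_get_true_ptkbs : Prop := ∀ (ptkb_qrels : List String) (conversation_id : String), Dom_get_true_ptkbs ptkb_qrels conversation_id → Pre_get_true_ptkbs ptkb_qrels conversation_id → Spec_get_true_ptkbs ptkb_qrels conversation_id (get_true_ptkbs ptkb_qrels conversation_id)

-- ===== LEMMAS AND PROOFS =====

theorem contains_eq_isSome {κ ν : Type} [BEq κ] (d : PySem.Dict κ ν) (k : κ) :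
    d.contains k = (d.get? k).isSome := by
  rcases d with ⟨items⟩
  simp only [PySem.Dict.contains, PySem.Dict.get?, Option.isSome_map]
  induction items with
  | nil => simp
  | cons p ps ih => cases hpk : p.1 == k <;> simp [hpk, ih]

-- A's step either leaves the state unchanged or sets the flag.
theorem stepA_cases (cid line : String) (st : List String × Bool) :
    stepA cid st line = st ∨ (stepA cid st line).2 = true := by
  simp only [stepA]
  rcases PySem.List.pyGet? (PySem.Str.split₀ (PySem.Str.strip line)) 0 with _ | id
  · left; rfl
  rcases PySem.List.pyGet? (PySem.Str.split₀ (PySem.Str.strip line)) 2 with _ | item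
  · left; rfl
  rcases PySem.List.pyGet? (PySem.Str.split₀ (PySem.Str.strip line)) 3 with _ | bo
  · left; rfl
  by_cases h : (id == cid) = true
  · right; simp [h]
  · left; simp [h]

-- While the flag is false, A's accumulator is empty.
theorem foldA_empty (cid : String) (q : List String) :
    ∀ st : List String × Bool, (st.2 = false → st.1 = []) →
    ((q.foldl (stepA cid) st).2 = false → (q.foldl (stepA cid) st).1 = []) := by
  induction q with
  | nil => intro st h; exact h
  | cons line rest ih =>
      intro st h
      rw [List.foldl_cons]
      refine ih _ ?_
      rcases stepA_cases cid line st with he | ht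
      · rw [he]; exact h
      · intro hf; rw [ht] at hf; cases hf

-- Loop invariant: B's dict answers cid exactly as A's (acc, flag) state does.
theorem get_true_ptkbs_loop (cid : String) (lines : List String)
    (hpre : ∀ line ∈ lines, 4 ≤ (PySem.Str.split₀ (PySem.Str.strip line)).length) :
    ∀ (acc : List String) (flag : Bool) (g : PySem.Dict String (List String)),
    (PySem.Dict.get? g cid = if flag then some acc else none) →
    (flag = false → acc = []) →
    PySem.Dict.get? (lines.foldl stepB g) cid =
      (if (lines.foldl (stepA cid) (acc, flag)).2
       then some (lines.foldl (stepA cid) (acc, flag)).1 else none) := by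
  induction lines with
  | nil => intro acc flag g hinv _; simpa using hinv
  | cons line rest ih =>
      intro acc flag g hinv hacc
      have hlen : 4 ≤ (PySem.Str.split₀ (PySem.Str.strip line)).length :=
        hpre line (by simp)
      have hrest : ∀ l ∈ rest, 4 ≤ (PySem.Str.split₀ (PySem.Str.strip l)).length :=
        fun l hl => hpre l (by simp [hl])
      rw [List.foldl_cons, List.foldl_cons]
      rcases hp : PySem.Str.split₀ (PySem.Str.strip line) with _ | ⟨p0, _ | ⟨p1, _ | ⟨p2, _ | ⟨p3, ps⟩⟩⟩⟩ <;>
        rw [hp] at hlen <;> simp at hlen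
      -- parts = p0 :: p1 :: p2 :: p3 :: ps
      have e0 : PySem.List.pyGet? (p0::p1::p2::p3::ps) 0 = some p0 := by
        have h : ((0:Int) ≤ (ps.length:Int) + 1 + 1 + 1) := by omega
        simp [PySem.List.pyGet?, PySem.List.pyIdx?, h]
      have e2 : PySem.List.pyGet? (p0::p1::p2::p3::ps) 2 = some p2 := by
        have h : ((2:Int) ≤ (ps.length:Int) + 1 + 1 + 1) := by omega
        simp [PySem.List.pyGet?, PySem.List.pyIdx?, h]
      have e3 : PySem.List.pyGet? (p0::p1::p2::p3::ps) 3 = some p3 := by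
        have h : ((3:Int) ≤ (ps.length:Int) + 1 + 1 + 1) := by omega
        simp [PySem.List.pyGet?, PySem.List.pyIdx?, h]
      have hsl : PySem.List.slice (p0::p1::p2::p3::ps) (some 0) (some 4) = [p0,p1,p2,p3] := by
        simp [PySem.List.slice, PySem.List.clampIdx]
      have hA : stepA cid (acc, flag) line =
          (if p0 == cid then ((if p3 == "1" then acc ++ [p2] else acc), true) else (acc, flag)) := by
        rw [stepA, hp, e0, e2, e3]
      have hB : stepB g line =
          (if p3 == "1"
           then PySem.Dict.insert (if PySem.Dict.contains g p0 then g else PySem.Dict.insert g p0 []) p0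
                  (PySem.Dict.getD (if PySem.Dict.contains g p0 then g else PySem.Dict.insert g p0 []) p0 [] ++ [p2])
           else (if PySem.Dict.contains g p0 then g else PySem.Dict.insert g p0 [])) := by
        rw [stepB, hp, hsl]
      by_cases h0 : p0 = cid
      · subst h0
        have hc : PySem.Dict.contains g p0 = flag := by
          rw [contains_eq_isSome, hinv]; cases flag <;> simp
        have hg' : PySem.Dict.get? (if PySem.Dict.contains g p0 then g else PySem.Dict.insert g p0 []) p0
            = some acc := by
          rw [hc]; cases flag with
          | false => rw [hacc rfl]; simpa using PySem.Dict.get?_insert_self g p0 []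
          | true => simpa using hinv
        have hgd : PySem.Dict.getD (if PySem.Dict.contains g p0 then g else PySem.Dict.insert g p0 []) p0 [] = acc := by
          rw [PySem.Dict.getD, hg']; rfl
        by_cases h1 : p3 = "1"
        · subst h1
          have hA2 : stepA p0 (acc, flag) line = (acc ++ [p2], true) := by
            rw [hA]; simp
          have hB2 : stepB g line =
              PySem.Dict.insert (if PySem.Dict.contains g p0 then g else PySem.Dict.insert g p0 []) p0 (acc ++ [p2]) := by
            rw [hB]; simp [hgd]
          rw [hA2, hB2]
          refine ih hrest (acc ++ [p2]) true _ ?_ (by simp)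
          rw [PySem.Dict.get?_insert_self]; rfl
        · have hA2 : stepA p0 (acc, flag) line = (acc, true) := by
            rw [hA]; simp [h1]
          have hB2 : stepB g line = (if PySem.Dict.contains g p0 then g else PySem.Dict.insert g p0 []) := by
            rw [hB]; simp [h1]
          rw [hA2, hB2]
          exact ih hrest acc true _ (by simpa using hg') (by simp)
      · -- non-matching id: A's state unchanged, B touches only key p0 ≠ cid
        have hne : cid ≠ p0 := fun h => h0 h.symm
        have hA2 : stepA cid (acc, flag) line = (acc, flag) := by
          rw [hA]; simp [h0]
        have hins : ∀ (d : PySem.Dict String (List String)) (v : List String),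
            PySem.Dict.get? (PySem.Dict.insert d p0 v) cid = PySem.Dict.get? d cid :=
          fun d v => PySem.Dict.get?_insert_of_ne d v hne
        have hkeep : PySem.Dict.get? (stepB g line) cid = PySem.Dict.get? g cid := by
          rw [hB]
          by_cases hb : p3 = "1" <;> by_cases hcg : PySem.Dict.contains g p0 = true <;>
            simp [hb, hcg, hins]
        rw [hA2]
        exact ih hrest acc flag _ (by rw [hkeep]; exact hinv) hacc

-- ===== VERDICT (by name: the statement is the Claim_ definition above) =====
theorem get_true_ptkbs_spec : Claim_equal_get_true_ptkbs := by
  intro q cid _ hpre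
  unfold Spec_get_true_ptkbs get_true_ptkbs get_true_ptkbs_alt
  have h := get_true_ptkbs_loop cid q hpre [] false PySem.Dict.empty
    (by simp [PySem.Dict.get?, PySem.Dict.empty]) (fun _ => rfl)
  rcases hfa : q.foldl (stepA cid) ([], false) with ⟨acc, flag⟩
  rw [hfa] at h
  cases flag with
  | false =>
      have hempty : acc = [] := by
        have := foldA_empty cid q ([], false) (fun _ => rfl)
        rw [hfa] at this; exact this rfl
      simp only [h, hempty]
      simp
  | true =>
      simp only [h]
      simp
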